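-- pv_equiv track=rewrite | github.com/Dranack21/Plex-AniList-sync | anilist.py | get_highest_progress
-- ===== SOURCE A (Python) =====
-- def get_highest_progress(progress_list):
--     anime_dict = {}
--     for anime_name, episode, _, air_date , episode_count in progress_list:
--         if anime_name in anime_dict:
--             anime_dict[anime_name]['max'] = max(anime_dict[anime_name]['max'], episode)
--             anime_dict[anime_name]['min'] = min(anime_dict[anime_name]['min'], episode)
--             anime_dict[anime_name]['air_date'] = air_date
--             anime_dict[anime_name]['episode_count'] = episode_count
--         else:
--             anime_dict[anime_name] = {
--                 'max': episode,
--                 'min': episode,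
--                 'air_date': air_date,
--                 'episode_count': episode_count
--             }
--     return (anime_dict);
-- ===== SOURCE B (Python) =====
-- def get_highest_progress(progress_list):
--     names = list(dict.fromkeys(t[0] for t in progress_list))
--     result = {}
--     for name in names:
--         eps = [(e, ad, ec) for (n, e, _, ad, ec) in progress_list if n == name]
--         result[name] = {
--             'max': max(e for e, _, _ in eps),
--             'min': min(e for e, _, _ in eps),
--             'air_date': eps[-1][1],
--             'episode_count': eps[-1][2],
--         }
--     return result
-- ===== Notes on version B (the rewrite author's own statement) =====
-- stated objective: alternative
-- what changed: Replaces A's single fold that incrementally updates a dict of aggregate records with a two-phase plan: ordered dedup of names, then per name a filter of the input whose episode list gives max/min directly and whose last element gives air_date/episode_count.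
import Mathlib
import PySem

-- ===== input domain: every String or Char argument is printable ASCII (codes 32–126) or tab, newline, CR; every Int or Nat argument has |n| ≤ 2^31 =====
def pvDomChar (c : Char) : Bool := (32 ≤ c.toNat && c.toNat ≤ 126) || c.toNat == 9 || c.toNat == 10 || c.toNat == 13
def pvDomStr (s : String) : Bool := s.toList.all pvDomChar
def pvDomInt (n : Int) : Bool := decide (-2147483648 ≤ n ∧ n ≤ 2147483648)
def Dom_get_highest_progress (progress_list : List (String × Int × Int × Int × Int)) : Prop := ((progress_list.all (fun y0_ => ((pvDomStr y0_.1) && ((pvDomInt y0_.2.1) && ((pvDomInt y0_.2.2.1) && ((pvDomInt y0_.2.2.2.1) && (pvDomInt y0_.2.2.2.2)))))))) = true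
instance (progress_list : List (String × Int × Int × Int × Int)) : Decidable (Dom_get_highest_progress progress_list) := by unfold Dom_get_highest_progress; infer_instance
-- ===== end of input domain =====

-- B replaces A's incremental dict-of-aggregates fold by dedup-of-names + per-name filter (alternative decomposition, not faster).


-- ===== PORT A =====
-- one loop iteration of A: dict item assignment = PySem.Dict.insert (overwrite keeps position)
def ghpStepA (d : PySem.Dict String (PySem.Dict String Int))
    (x : String × Int × Int × Int × Int) : PySem.Dict String (PySem.Dict String Int) :=
  match x with
  | (anime_name, episode, _, air_date, episode_count) =>
    if d.contains anime_name then
      -- anime_dict[anime_name] is present on this branch; getD's default is unreachable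
      let v := d.getD anime_name PySem.Dict.empty
      let v := v.insert "max" (max (v.getD "max" 0) episode)
      let v := v.insert "min" (min (v.getD "min" 0) episode)
      let v := v.insert "air_date" air_date
      let v := v.insert "episode_count" episode_count
      d.insert anime_name v
    else
      d.insert anime_name (PySem.Dict.ofList
        [("max", episode), ("min", episode), ("air_date", air_date), ("episode_count", episode_count)])

def get_highest_progress (progress_list : List (String × Int × Int × Int × Int)) : List (String × List (String × Int)) :=
  (progress_list.foldl ghpStepA PySem.Dict.empty).items.map (fun p => (p.1, p.2.items))

-- ===== PORT B =====
def get_highest_progress_alt (progress_list : List (String × Int × Int × Int × Int)) : List (String × List (String × Int)) :=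
  let names := PySem.List.dedup (progress_list.map (·.1))
  names.map (fun name =>
    let eps := (progress_list.filter (fun t => t.1 == name)).map (fun t => (t.2.1, t.2.2.2.1, t.2.2.2.2))
    match eps with
    | [] => (name, [])   -- unreachable: every name in names occurs in progress_list
    | h :: t =>
      (name, [("max", t.foldl (fun m e => max m e.1) h.1),
              ("min", t.foldl (fun m e => min m e.1) h.1),
              ("air_date", (t.getLastD h).2.1),
              ("episode_count", (t.getLastD h).2.2)]))

-- ===== PRECONDITION & SPEC =====
def Spec_get_highest_progress (progress_list : List (String × Int × Int × Int × Int)) (out : List (String × List (String × Int))) : Prop := out = get_highest_progress_alt progress_list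
instance (progress_list : List (String × Int × Int × Int × Int)) (out : List (String × List (String × Int))) : Decidable (Spec_get_highest_progress progress_list out) := by unfold Spec_get_highest_progress; infer_instance

-- ===== CLAIM (what is proved, stated in full; the proofs are below) =====
def Claim_equal_get_highest_progress : Prop := ∀ (progress_list : List (String × Int × Int × Int × Int)), Dom_get_highest_progress progress_list → Spec_get_highest_progress progress_list (get_highest_progress progress_list)

-- ===== LEMMAS AND PROOFS =====

def ghpEps (l : List (String × Int × Int × Int × Int)) (n : String) : List (Int × Int × Int) :=
  (l.filter (fun t => t.1 == n)).map (fun t => (t.2.1, t.2.2.2.1, t.2.2.2.2))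

def ghpInner (l : List (String × Int × Int × Int × Int)) (n : String) : PySem.Dict String Int :=
  match ghpEps l n with
  | [] => PySem.Dict.empty
  | h :: t => PySem.Dict.ofList
      [("max", t.foldl (fun m e => max m e.1) h.1),
       ("min", t.foldl (fun m e => min m e.1) h.1),
       ("air_date", (t.getLastD h).2.1),
       ("episode_count", (t.getLastD h).2.2)]

theorem ghp_upd (ep ad ec M m A E : Int) :
    (let v := PySem.Dict.ofList [("max", M), ("min", m), ("air_date", A), ("episode_count", E)]
    let v := v.insert "max" (max (v.getD "max" 0) ep)
    let v := v.insert "min" (min (v.getD "min" 0) ep)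
    let v := v.insert "air_date" ad
    let v := v.insert "episode_count" ec
    v) = PySem.Dict.ofList [("max", max M ep), ("min", min m ep), ("air_date", ad), ("episode_count", ec)] := rfl

theorem ghp_step_eq (d : PySem.Dict String (PySem.Dict String Int)) (nm : String) (ep c ad ec : Int) :
    ghpStepA d (nm, ep, c, ad, ec) =
      (if d.contains nm then
        d.insert nm
          (let v := d.getD nm PySem.Dict.empty
           let v := v.insert "max" (max (v.getD "max" 0) ep)
           let v := v.insert "min" (min (v.getD "min" 0) ep)
           let v := v.insert "air_date" ad
           let v := v.insert "episode_count" ec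
           v)
      else d.insert nm (PySem.Dict.ofList
        [("max", ep), ("min", ep), ("air_date", ad), ("episode_count", ec)])) := rfl

theorem ghp_eps_append_ne (l : List (String × Int × Int × Int × Int)) (n : String)
    (x : String × Int × Int × Int × Int) (h : x.1 ≠ n) : ghpEps (l ++ [x]) n = ghpEps l n := by
  have hb : (x.1 == n) = false := by simpa using h
  simp [ghpEps, List.filter_append, List.filter, hb]

theorem ghp_eps_append_self (l : List (String × Int × Int × Int × Int))
    (nm : String) (ep c ad ec : Int) :
    ghpEps (l ++ [(nm, ep, c, ad, ec)]) nm = ghpEps l nm ++ [(ep, ad, ec)] := by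
  simp [ghpEps, List.filter_append, List.filter]

theorem ghp_eps_nil (l : List (String × Int × Int × Int × Int)) (n : String)
    (h : n ∉ l.map (·.1)) : ghpEps l n = [] := by
  simp only [ghpEps, List.map_eq_nil_iff, List.filter_eq_nil_iff]
  intro t ht hbeq
  exact h (List.mem_map.mpr ⟨t, ht, by simpa using hbeq⟩)

theorem ghp_eps_ne_nil (l : List (String × Int × Int × Int × Int)) (n : String)
    (h : n ∈ l.map (·.1)) : ghpEps l n ≠ [] := by
  obtain ⟨t, ht, rfl⟩ := List.mem_map.mp h
  simp only [ghpEps, ne_eq, List.map_eq_nil_iff, List.filter_eq_nil_iff]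
  intro hc
  exact hc t ht (by simp)

theorem ghp_main (l : List (String × Int × Int × Int × Int)) :
    l.foldl ghpStepA PySem.Dict.empty
      = PySem.Dict.mk ((PySem.List.dedup (l.map (·.1))).map (fun n => (n, ghpInner l n))) := by
  induction l using List.reverseRecOn with
  | nil => rfl
  | append_singleton l x ih =>
    obtain ⟨nm, ep, c, ad, ec⟩ := x
    rw [List.foldl_append, List.foldl_cons, List.foldl_nil, ih]
    have hmapapp : ((l ++ [(nm, ep, c, ad, ec)]).map (·.1)) = l.map (·.1) ++ [nm] := by simp
    have hkeys : (PySem.Dict.mk ((PySem.List.dedup (l.map (·.1))).map (fun n => (n, ghpInner l n)))).keys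
        = PySem.List.dedup (l.map (·.1)) := by
      simp only [PySem.Dict.keys_mk, List.map_map]
      have hc : ((fun (x : String × PySem.Dict String Int) => x.1) ∘ fun n => (n, ghpInner l n)) = id := rfl
      rw [hc, List.map_id]
    by_cases hmem : nm ∈ l.map (·.1)
    · have hcont : (PySem.Dict.mk ((PySem.List.dedup (l.map (·.1))).map (fun n => (n, ghpInner l n)))).contains nm = true := by
        rw [PySem.Dict.contains_eq_decide_mem_keys, hkeys]
        simp [hmem]
      have hnd : (PySem.Dict.mk ((PySem.List.dedup (l.map (·.1))).map (fun n => (n, ghpInner l n)))).keys.Nodup := by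
        rw [hkeys]; exact PySem.List.nodup_dedup _
      have hin : (nm, ghpInner l nm) ∈ ((PySem.List.dedup (l.map (·.1))).map (fun n => (n, ghpInner l n))) :=
        List.mem_map.mpr ⟨nm, (PySem.List.mem_dedup _ _).mpr hmem, rfl⟩
      have hv : (PySem.Dict.mk ((PySem.List.dedup (l.map (·.1))).map (fun n => (n, ghpInner l n)))).getD nm PySem.Dict.empty = ghpInner l nm :=
        PySem.Dict.getD_of_mem_items _ hin hnd _
      have hN' : PySem.List.dedup ((l ++ [(nm, ep, c, ad, ec)]).map (·.1)) = PySem.List.dedup (l.map (·.1)) := by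
        rw [hmapapp, PySem.List.dedup_eq_ofList, PySem.Set.ofList_append, PySem.List.dedup_eq_ofList]
        show (PySem.Set.ofList (l.map (·.1))).add nm = _
        exact PySem.Set.add_of_mem ((PySem.Set.mem_ofList _ _).mpr hmem)
      obtain ⟨h0, t0, heps⟩ : ∃ h0 t0, ghpEps l nm = h0 :: t0 := by
        cases h : ghpEps l nm with
        | nil => exact absurd h (ghp_eps_ne_nil l nm hmem)
        | cons a b => exact ⟨a, b, rfl⟩
      rw [ghp_step_eq, hcont]
      simp only [if_true, hv]
      apply PySem.Dict.ext
      rw [PySem.Dict.items_insert_of_contains _ _ hcont]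
      show List.map _ (List.map _ _) = List.map _ (PySem.List.dedup ((l ++ [(nm, ep, c, ad, ec)]).map (·.1)))
      rw [hN', List.map_map]
      apply List.map_congr_left
      intro n hn
      by_cases hne : n = nm
      · subst hne
        simp only [Function.comp_apply, beq_self_eq_true, if_true]
        have heps' : ghpEps (l ++ [(n, ep, c, ad, ec)]) n = h0 :: (t0 ++ [(ep, ad, ec)]) := by
          rw [ghp_eps_append_self, heps]; rfl
        have hInn : ghpInner (l ++ [(n, ep, c, ad, ec)]) n
            = PySem.Dict.ofList [("max", max (t0.foldl (fun m e => max m e.1) h0.1) ep),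
               ("min", min (t0.foldl (fun m e => min m e.1) h0.1) ep),
               ("air_date", ad), ("episode_count", ec)] := by
          unfold ghpInner
          rw [heps']
          simp [List.foldl_append]
        have hInl : ghpInner l n = PySem.Dict.ofList
            [("max", t0.foldl (fun m e => max m e.1) h0.1),
             ("min", t0.foldl (fun m e => min m e.1) h0.1),
             ("air_date", (t0.getLastD h0).2.1), ("episode_count", (t0.getLastD h0).2.2)] := by
          unfold ghpInner
          rw [heps]
        rw [hInn, hInl]
        exact congrArg _ (ghp_upd ep ad ec _ _ _ _)
      · have hb : (n == nm) = false := by simpa using hne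
        have hInn : ghpInner (l ++ [(nm, ep, c, ad, ec)]) n = ghpInner l n := by
          unfold ghpInner
          rw [ghp_eps_append_ne l n _ (by simpa using Ne.symm hne)]
        simp only [Function.comp_apply, hb, Bool.false_eq_true, if_false, hInn]
    · have hcont : (PySem.Dict.mk ((PySem.List.dedup (l.map (·.1))).map (fun n => (n, ghpInner l n)))).contains nm = false := by
        rw [PySem.Dict.contains_eq_decide_mem_keys, hkeys]
        simp [hmem]
      have hN' : PySem.List.dedup ((l ++ [(nm, ep, c, ad, ec)]).map (·.1)) = PySem.List.dedup (l.map (·.1)) ++ [nm] := by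
        rw [hmapapp, PySem.List.dedup_eq_ofList, PySem.Set.ofList_append, PySem.List.dedup_eq_ofList]
        show (PySem.Set.ofList (l.map (·.1))).add nm = _
        exact PySem.Set.add_of_not_mem (fun hc => hmem ((PySem.Set.mem_ofList _ _).mp hc))
      rw [ghp_step_eq, hcont]
      simp only [Bool.false_eq_true, if_false]
      apply PySem.Dict.ext
      rw [PySem.Dict.items_insert_of_not_contains _ _ hcont]
      show (List.map _ _) ++ _ = List.map _ (PySem.List.dedup ((l ++ [(nm, ep, c, ad, ec)]).map (·.1)))
      rw [hN', List.map_append]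
      congr 1
      · apply List.map_congr_left
        intro n hn
        have hnl : n ∈ l.map (·.1) := (PySem.List.mem_dedup _ _).mp hn
        have hne : nm ≠ n := fun h => hmem (h ▸ hnl)
        have hInn : ghpInner (l ++ [(nm, ep, c, ad, ec)]) n = ghpInner l n := by
          unfold ghpInner
          rw [ghp_eps_append_ne l n _ hne]
        show (n, ghpInner l n) = (n, ghpInner (l ++ [(nm, ep, c, ad, ec)]) n)
        rw [hInn]
      · have hnil : ghpEps l nm = [] := ghp_eps_nil l nm hmem
        have heps' : ghpEps (l ++ [(nm, ep, c, ad, ec)]) nm = [(ep, ad, ec)] := by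
          rw [ghp_eps_append_self, hnil]; rfl
        simp only [List.map_cons, List.map_nil]
        have hInn : ghpInner (l ++ [(nm, ep, c, ad, ec)]) nm = PySem.Dict.ofList
            [("max", ep), ("min", ep), ("air_date", ad), ("episode_count", ec)] := by
          unfold ghpInner
          rw [heps']
          rfl
        rw [hInn]

-- ===== VERDICT (by name: the statement is the Claim_ definition above) =====
theorem get_highest_progress_spec : Claim_equal_get_highest_progress := by
  intro l _
  unfold Spec_get_highest_progress get_highest_progress get_highest_progress_alt
  rw [ghp_main]
  simp only [List.map_map]
  apply List.map_congr_left
  intro n hn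
  show (n, (ghpInner l n).items) = _
  simp only [ghpInner, ghpEps]
  cases (l.filter (fun t => t.1 == n)).map (fun t => (t.2.1, t.2.2.2.1, t.2.2.2.2)) with
  | nil => rfl
  | cons h t => rfl
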